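-- pv_equiv track=rewrite | github.com/thorwhalen/plunk | plunk/ap/session_table/session_table_app.py | filterByNamesOperator
-- ===== SOURCE A (Python) =====
-- from typing import List, Dict, Union, TypedDict
--
-- def filterByNamesOperator(
--     names: List[str], operator: str, namedList: List[Dict[str, str]]
-- ) -> bool:
--     if operator == 'and' and not all(
--         name in [item['name'] for item in namedList] for name in names
--     ):
--         return False
--     elif operator == 'or' and not any(
--         name in [item['name'] for item in namedList] for name in names
--     ):
--         return False
--     return True
-- ===== SOURCE B (Python) =====
-- def filterByNamesOperator(names, operator, namedList):
--     if operator != 'and' and operator != 'or':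
--         return True
--     if not names:
--         return operator == 'and'
--     remaining = set(names)
--     total = len(remaining)
--     for item in namedList:
--         remaining.discard(item['name'])
--     hits = total - len(remaining)
--     if operator == 'and':
--         return hits == total
--     return hits > 0
-- ===== Notes on version B (the rewrite author's own statement) =====
-- stated objective: alternative
-- what changed: Instead of testing each requested name against a name list rebuilt from namedList, B makes one pass over namedList, discarding each seen name from the set of requested names, and decides 'and'/'or' by comparing the hit count to the total (unknown operators and empty names handled by early returns).
import Mathlib
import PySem

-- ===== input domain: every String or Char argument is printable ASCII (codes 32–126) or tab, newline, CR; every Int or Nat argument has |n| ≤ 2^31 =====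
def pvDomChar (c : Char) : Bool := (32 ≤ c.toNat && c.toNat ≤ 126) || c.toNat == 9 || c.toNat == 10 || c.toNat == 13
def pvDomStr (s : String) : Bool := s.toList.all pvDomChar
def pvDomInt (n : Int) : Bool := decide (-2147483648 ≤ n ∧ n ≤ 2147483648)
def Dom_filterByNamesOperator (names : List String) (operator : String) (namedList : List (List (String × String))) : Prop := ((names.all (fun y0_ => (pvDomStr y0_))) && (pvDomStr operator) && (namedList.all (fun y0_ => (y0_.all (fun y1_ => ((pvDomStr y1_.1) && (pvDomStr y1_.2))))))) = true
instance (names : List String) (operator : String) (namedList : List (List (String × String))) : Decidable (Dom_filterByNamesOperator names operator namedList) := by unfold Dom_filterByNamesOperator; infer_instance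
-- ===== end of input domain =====

-- B replaces A's per-name scans of a rebuilt name list by one pass over namedList that discards
-- each seen name from the set of wanted names, then answers by comparing counts; objective: alternative.

-- ===== PORT A =====
-- [item['name'] for item in namedList]; getD "" is exact under Pre_ (every dict has the 'name' key wherever the comprehension is evaluated)
def pvNamesA (namedList : List (List (String × String))) : List String :=
  namedList.map (fun item => PySem.Dict.getD ⟨item⟩ "name" "")

def filterByNamesOperator (names : List String) (operator : String) (namedList : List (List (String × String))) : Bool :=
  if operator == "and" && !(names.all (fun name => (pvNamesA namedList).contains name)) then
    false
  else if operator == "or" && !(names.any (fun name => (pvNamesA namedList).contains name)) then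
    false
  else
    true

-- ===== PORT B =====
def filterByNamesOperator_alt (names : List String) (operator : String) (namedList : List (List (String × String))) : Bool :=
  if !(operator == "and") && !(operator == "or") then
    true
  else if names.isEmpty then
    operator == "and"
  else
    let q : PySem.Set String := PySem.Set.ofList names
    let total : Int := PySem.Set.len q
    let remaining : PySem.Set String :=
      namedList.foldl (fun s item => PySem.Set.discard s (PySem.Dict.getD ⟨item⟩ "name" "")) q
    let hits : Int := total - PySem.Set.len remaining
    if operator == "and" then hits == total
    else decide (hits > 0)

-- ===== PRECONDITION & SPEC =====
-- Pre_ excludes exactly the inputs on which the Python A raises KeyError: with operator 'and' or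
-- 'or' and a nonempty names list the comprehension item['name'] is evaluated, so every dict in
-- namedList must carry a 'name' key there (first-match lookup in the association list).
def Pre_filterByNamesOperator (names : List String) (operator : String) (namedList : List (List (String × String))) : Prop :=
  (operator = "and" ∨ operator = "or") → names ≠ [] →
    ∀ d ∈ namedList, "name" ∈ d.map Prod.fst

instance (names : List String) (operator : String) (namedList : List (List (String × String))) : Decidable (Pre_filterByNamesOperator names operator namedList) := by unfold Pre_filterByNamesOperator; infer_instance

def pvWitness_filterByNamesOperator : List String × String × (List (List (String × String))) :=
  (["a", "b"], "and", [[("name", "a")], [("name", "b"), ("x", "c")]])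

def Spec_filterByNamesOperator (names : List String) (operator : String) (namedList : List (List (String × String))) (out : Bool) : Prop := out = filterByNamesOperator_alt names operator namedList
instance (names : List String) (operator : String) (namedList : List (List (String × String))) (out : Bool) : Decidable (Spec_filterByNamesOperator names operator namedList out) := by unfold Spec_filterByNamesOperator; infer_instance

-- ===== CLAIM (what is proved, stated in full; the proofs are below) =====
def Claim_equal_filterByNamesOperator : Prop := ∀ (names : List String) (operator : String) (namedList : List (List (String × String))), Dom_filterByNamesOperator names operator namedList → Pre_filterByNamesOperator names operator namedList → Spec_filterByNamesOperator names operator namedList (filterByNamesOperator names operator namedList)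

-- ===== LEMMAS AND PROOFS =====

-- the B loop ('for item in namedList: remaining.discard(item["name"])') keeps exactly the
-- names that occur under no 'name' key of namedList
theorem pv_foldl_discard (L : List (List (String × String))) (s : List String) :
    L.foldl (fun s item => PySem.Set.discard s (PySem.Dict.getD ⟨item⟩ "name" "")) s
      = s.filter (fun y => !(pvNamesA L).contains y) := by
  induction L generalizing s with
  | nil => simp [pvNamesA]
  | cons a L ih =>
    rw [List.foldl_cons, ih]
    simp only [PySem.Set.discard, List.filter_filter, pvNamesA, List.map_cons, List.contains_cons]
    apply List.filter_congr
    intro y _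
    cases h : (y == PySem.Dict.getD ⟨a⟩ "name" "") <;> simp_all

-- ===== VERDICT (by name: the statement is the Claim_ definition above) =====
theorem filterByNamesOperator_spec : Claim_equal_filterByNamesOperator := by
  intro names operator namedList _ _
  unfold Spec_filterByNamesOperator filterByNamesOperator filterByNamesOperator_alt
  by_cases hand : operator = "and"
  · subst hand
    rcases names with _ | ⟨n, ns⟩
    · simp
    · simp only [pv_foldl_discard, PySem.Set.len, List.isEmpty_cons, String.reduceBEq,
        beq_self_eq_true, Bool.not_true, Bool.not_false, Bool.true_and, Bool.false_and,
        Bool.false_eq_true, if_false]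
      by_cases hall : ((n :: ns).all fun name => (pvNamesA namedList).contains name) = true
      · have hnil : List.filter (fun y => !(pvNamesA namedList).contains y) (PySem.Set.ofList (n :: ns)) = [] := by
          apply List.filter_eq_nil_iff.mpr
          intro y hy
          have := List.all_eq_true.mp hall y ((PySem.Set.mem_ofList _ _).1 hy)
          simpa using this
        rw [hnil]
        simpa using hall
      · have hall' : ((n :: ns).all fun name => (pvNamesA namedList).contains name) = false := by
          simpa using hall
        have hpos : 0 < (List.filter (fun y => !(pvNamesA namedList).contains y) (PySem.Set.ofList (n :: ns))).length := by
          simp only [List.all_eq_true, not_forall] at hall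
          obtain ⟨y, hy, hny⟩ := hall
          apply List.length_pos_iff.mpr
          intro hnil
          have : y ∈ List.filter (fun y => !(pvNamesA namedList).contains y) (PySem.Set.ofList (n :: ns)) := by
            simp only [List.mem_filter]
            exact ⟨(PySem.Set.mem_ofList _ _).2 hy, by simpa using hny⟩
          rw [hnil] at this; simp at this
        simp only [hall', Bool.not_false, if_true]
        exact ((beq_eq_false_iff_ne).mpr (by omega)).symm
  · by_cases hor : operator = "or"
    · subst hor
      rcases names with _ | ⟨n, ns⟩
      · simp
      · simp only [pv_foldl_discard, PySem.Set.len, List.isEmpty_cons, String.reduceBEq,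
          beq_self_eq_true, Bool.not_true, Bool.not_false, Bool.true_and, Bool.false_and,
          Bool.and_false, Bool.false_eq_true, if_false]
        have hle : (List.filter (fun y => !(pvNamesA namedList).contains y) (PySem.Set.ofList (n :: ns))).length
            ≤ (PySem.Set.ofList (n :: ns)).length := List.length_filter_le _ _
        by_cases hany : ((n :: ns).any fun name => (pvNamesA namedList).contains name) = true
        · have hlt : (List.filter (fun y => !(pvNamesA namedList).contains y) (PySem.Set.ofList (n :: ns))).length
              < (PySem.Set.ofList (n :: ns)).length := by
            apply List.length_filter_lt_length_iff_exists.mpr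
            obtain ⟨y, hy, hcy⟩ := List.any_eq_true.mp hany
            exact ⟨y, (PySem.Set.mem_ofList _ _).2 hy, by simpa using hcy⟩
          have hgt : (0 : Int) < (PySem.Set.ofList (n :: ns)).length -
              (List.filter (fun y => !(pvNamesA namedList).contains y) (PySem.Set.ofList (n :: ns))).length := by
            omega
          simp only [hany, Bool.not_true, Bool.false_eq_true, if_false]
          exact (decide_eq_true hgt).symm
        · have hany' : ((n :: ns).any fun name => (pvNamesA namedList).contains name) = false := by
            simpa using hany
          have heq : List.filter (fun y => !(pvNamesA namedList).contains y) (PySem.Set.ofList (n :: ns))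
              = PySem.Set.ofList (n :: ns) := by
            apply List.filter_eq_self.mpr
            intro y hy
            have := List.any_eq_false.mp hany' y ((PySem.Set.mem_ofList _ _).1 hy)
            simpa using this
          rw [heq]
          simp
          simpa using hany'
    · simp [hand, hor, beq_iff_eq]
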